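-- pv_equiv track=rewrite | github.com/moizahmedshaikh/Physical-AI-Humanoid-Robotics-textbook | api/src/services/agent_validator.py | _is_greeting_or_pleasantry
-- ===== SOURCE A (Python) =====
-- def _is_greeting_or_pleasantry(text: str) -> bool:
--     text_lower = text.strip().lower()
--     greetings = ['hello', 'hi', 'hey', 'good morning', 'good afternoon', 'good evening', 'greetings', 'howdy', 'salutations']
--     pleasantries = ['please', 'thank you', 'thanks', 'please and thank you', 'appreciate it', 'much appreciated', 'you\'re welcome', 'welcome']
--     for greeting in greetings:
--         if text_lower == greeting or text_lower.startswith(greeting + ' ') or text_lower.endswith(' ' + greeting) or ' ' + greeting + ' ' in text_lower: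
--             return True
--     for pleasantry in pleasantries:
--         if text_lower == pleasantry or text_lower.startswith(pleasantry + ' ') or text_lower.endswith(' ' + pleasantry) or ' ' + pleasantry + ' ' in text_lower:
--             return True
--     return False
-- ===== SOURCE B (Python) =====
-- GREETINGS = ['hello', 'hi', 'hey', 'good morning', 'good afternoon', 'good evening', 'greetings', 'howdy', 'salutations']
-- PLEASANTRIES = ['please', 'thank you', 'thanks', 'please and thank you', 'appreciate it', 'much appreciated', "you're welcome", 'welcome']
--
--
-- def _occurs(target, words):
--     # does the word-sequence `target` occur as a contiguous run inside `words`?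
--     n = len(target)
--     for i in range(len(words) - n + 1):
--         if words[i:i + n] == target:
--             return True
--     return False
--
--
-- def _is_greeting_or_pleasantry(text: str) -> bool:
--     # token-sequence matching: split once on single spaces, then look for each
--     # phrase's word-list as a contiguous sublist of the text's word-list
--     words = text.strip().lower().split(' ')
--     for phrase in GREETINGS + PLEASANTRIES:
--         if _occurs(phrase.split(' '), words):
--             return True
--     return False
-- ===== Notes on version B (the rewrite author's own statement) =====
-- stated objective: alternative
-- what changed: B splits the text once into its single-space-separated token list and searches for each phrase's token list as a contiguous sublist via an index/slice scan, instead of A's four-way per-phrase substring tests (equality/startswith/endswith/padded 'in').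
import Mathlib
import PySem

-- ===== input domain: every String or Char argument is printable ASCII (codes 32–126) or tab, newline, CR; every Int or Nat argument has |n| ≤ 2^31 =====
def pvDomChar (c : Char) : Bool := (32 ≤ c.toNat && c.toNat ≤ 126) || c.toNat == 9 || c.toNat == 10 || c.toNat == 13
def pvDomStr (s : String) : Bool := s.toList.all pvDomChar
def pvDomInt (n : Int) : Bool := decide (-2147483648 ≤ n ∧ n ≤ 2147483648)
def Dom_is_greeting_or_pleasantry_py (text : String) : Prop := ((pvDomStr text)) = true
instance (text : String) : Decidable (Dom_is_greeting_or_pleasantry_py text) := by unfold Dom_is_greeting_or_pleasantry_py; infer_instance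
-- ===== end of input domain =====

-- B replaces A's per-phrase four-case substring scanning by splitting the text once into
-- its space-separated token list and looking for each phrase's token list as a contiguous
-- sublist (objective: alternative/idiomatic token matching; return values identical).

-- ===== PORT A =====
def pvGreetings : List (List Char) :=
  ["hello".toList, "hi".toList, "hey".toList, "good morning".toList, "good afternoon".toList,
   "good evening".toList, "greetings".toList, "howdy".toList, "salutations".toList]

def pvPleasantries : List (List Char) :=
  ["please".toList, "thank you".toList, "thanks".toList, "please and thank you".toList,
   "appreciate it".toList, "much appreciated".toList, "you're welcome".toList, "welcome".toList]

-- the four-way condition of A's `if`, in A's order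
def pvFourA (tl p : List Char) : Bool :=
  tl == p || PySem.Chars.startswith tl (p ++ [' ']) || PySem.Chars.endswith tl ([' '] ++ p)
    || PySem.Chars.isIn ([' '] ++ p ++ [' ']) tl

def is_greeting_or_pleasantry_py (text : String) : Bool :=
  let text_lower := PySem.Chars.lower (PySem.Chars.strip text.toList)
  if pvGreetings.any (fun greeting => pvFourA text_lower greeting) then true
  else if pvPleasantries.any (fun pleasantry => pvFourA text_lower pleasantry) then true
  else false

-- ===== PORT B =====
-- does `target` occur as a contiguous run inside `words`? (B's index/slice scan)
def pvOccurs (target words : List (List Char)) : Bool :=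
  (PySem.List.pyRange 0 ((words.length : Int) - (target.length : Int) + 1) 1).any
    (fun i => PySem.List.slice words (some i) (some (i + (target.length : Int))) == target)

def is_greeting_or_pleasantry_py_alt (text : String) : Bool :=
  let words := PySem.Chars.splitOn (PySem.Chars.lower (PySem.Chars.strip text.toList)) [' ']
  (pvGreetings ++ pvPleasantries).any
    (fun phrase => pvOccurs (PySem.Chars.splitOn phrase [' ']) words)

-- ===== PRECONDITION & SPEC =====
def Spec_is_greeting_or_pleasantry_py (text : String) (out : Bool) : Prop := out = is_greeting_or_pleasantry_py_alt text
instance (text : String) (out : Bool) : Decidable (Spec_is_greeting_or_pleasantry_py text out) := by unfold Spec_is_greeting_or_pleasantry_py; infer_instance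

-- ===== CLAIM (what is proved, stated in full; the proofs are below) =====
def Claim_equal_is_greeting_or_pleasantry_py : Prop := ∀ (text : String), Dom_is_greeting_or_pleasantry_py text → Spec_is_greeting_or_pleasantry_py text (is_greeting_or_pleasantry_py text)

-- ===== LEMMAS AND PROOFS =====

-- structural single-character splitter (proof-side model of Python's s.split(sep) for len(sep)=1)
def pvSplit1 (c : Char) : List Char → List (List Char)
  | [] => [[]]
  | a :: t =>
    if a = c then [] :: pvSplit1 c t
    else match pvSplit1 c t with
         | [] => [[a]]
         | h :: r => (a :: h) :: r

def pvPrep (x : List Char) : List (List Char) → List (List Char)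
  | [] => [x]
  | h :: r => (x ++ h) :: r

theorem pvSplit1_ne_nil (c : Char) (s : List Char) : pvSplit1 c s ≠ [] := by
  cases s with
  | nil => simp [pvSplit1]
  | cons a t =>
    simp only [pvSplit1]
    split_ifs
    · simp
    · cases pvSplit1 c t <;> simp

theorem pvGo_eq (c : Char) : ∀ (fuel : Nat) (l cur acc : _), l.length < fuel →
    PySem.Chars.splitOn.go [c] fuel l cur acc = acc.reverse ++ pvPrep cur.reverse (pvSplit1 c l) := by
  intro fuel
  induction fuel with
  | zero => intro l cur acc h; omega
  | succ f ih =>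
    intro l cur acc h
    cases l with
    | nil => simp [PySem.Chars.splitOn.go, pvSplit1, pvPrep]
    | cons a rest =>
      by_cases hc : a = c
      · subst hc
        rw [show PySem.Chars.splitOn.go [a] (f+1) (a :: rest) cur acc
              = PySem.Chars.splitOn.go [a] f rest [] (cur.reverse :: acc) from by
            simp [PySem.Chars.splitOn.go, List.isPrefixOf]]
        rw [ih rest [] (cur.reverse :: acc) (by simpa using Nat.lt_of_succ_lt_succ h)]
        cases hs : pvSplit1 a rest with
        | nil => exact absurd hs (pvSplit1_ne_nil a rest)
        | cons hd tl => simp [pvSplit1, pvPrep, hs]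
      · rw [show PySem.Chars.splitOn.go [c] (f+1) (a :: rest) cur acc
              = PySem.Chars.splitOn.go [c] f rest (a :: cur) acc from by
            simp [PySem.Chars.splitOn.go, List.isPrefixOf, Ne.symm hc]]
        rw [ih rest (a :: cur) acc (by simpa using Nat.lt_of_succ_lt_succ h)]
        simp only [pvSplit1, if_neg hc, List.reverse_cons]
        cases hs : pvSplit1 c rest with
        | nil => exact absurd hs (pvSplit1_ne_nil c rest)
        | cons hd tl => simp [pvPrep]

theorem pvSplitOn_single (c : Char) (s : List Char) :
    PySem.Chars.splitOn s [c] = pvSplit1 c s := by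
  unfold PySem.Chars.splitOn
  rw [pvGo_eq c (s.length + 1) s [] [] (by omega)]
  cases hs : pvSplit1 c s with
  | nil => exact absurd hs (pvSplit1_ne_nil c s)
  | cons hd tl => simp [pvPrep]

def pvJoin (c : Char) (ts : List (List Char)) : List Char := (ts.map (fun t => t ++ [c])).flatten

theorem pvJoin_append (c : Char) (u v : List (List Char)) :
    pvJoin c (u ++ v) = pvJoin c u ++ pvJoin c v := by simp [pvJoin]

theorem pvJoin_split (c : Char) (s : List Char) : pvJoin c (pvSplit1 c s) = s ++ [c] := by
  induction s with
  | nil => simp [pvSplit1, pvJoin]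
  | cons a t ih =>
    simp only [pvSplit1]
    split_ifs with hc
    · subst hc; simp only [pvJoin, List.map_cons, List.flatten_cons] at ih ⊢; simp [ih]
    · cases hs : pvSplit1 c t with
      | nil => exact absurd hs (pvSplit1_ne_nil c t)
      | cons hd tl =>
        rw [hs] at ih
        simp only [pvJoin, List.map_cons, List.flatten_cons] at ih ⊢
        simpa [List.append_assoc] using congrArg (fun l => a :: l) ih

theorem pvSplit1_free (c : Char) (s : List Char) : ∀ t ∈ pvSplit1 c s, c ∉ t := by
  induction s with
  | nil => simp [pvSplit1]
  | cons a t ih =>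
    simp only [pvSplit1]
    split_ifs with hc
    · intro x hx
      rcases List.mem_cons.mp hx with h | h
      · subst h; simp
      · exact ih x h
    · cases hs : pvSplit1 c t with
      | nil => exact absurd hs (pvSplit1_ne_nil c t)
      | cons hd tl =>
        rw [hs] at ih
        intro x hx
        rcases List.mem_cons.mp hx with h | h
        · subst h
          intro hmem
          rcases List.mem_cons.mp hmem with h' | h'
          · exact hc h'.symm
          · exact ih hd (by simp) h'
        · exact ih x (by simp [h])

-- skipping a c-free block: an occurrence of a pattern starting with c lies past it
theorem pvSkip (c : Char) (q : List Char) : ∀ (t r : List Char), c ∉ t →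
    (c :: q) <:+: (t ++ r) → (c :: q) <:+: r := by
  intro t
  induction t with
  | nil => intro r _ h; simpa using h
  | cons b t' ih =>
    intro r hfree h
    rw [List.cons_append, List.infix_cons_iff] at h
    rcases h with h | h
    · rcases h with ⟨w, hw⟩
      simp only [List.cons_append] at hw
      have : c = b := by exact (List.cons.injEq _ _ _ _).mp hw |>.1
      exact absurd (this ▸ List.mem_cons_self) hfree
    · exact ih r (fun hm => hfree (List.mem_cons_of_mem _ hm)) h

theorem pvAlign (c : Char) : ∀ (q t x y : List Char), c ∉ q → c ∉ t →
    (q ++ c :: x) <+: (t ++ c :: y) → q = t ∧ x <+: y := by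
  intro q
  induction q with
  | nil =>
    intro t x y _ ht h
    cases t with
    | nil => simpa using h
    | cons b t' =>
      rcases h with ⟨w, hw⟩
      simp only [List.nil_append, List.cons_append] at hw
      have : c = b := ((List.cons.injEq _ _ _ _).mp hw).1
      exact absurd (this ▸ List.mem_cons_self) ht
  | cons a q' ih =>
    intro t x y hq ht h
    cases t with
    | nil =>
      rcases h with ⟨w, hw⟩
      simp only [List.cons_append, List.nil_append] at hw
      have : a = c := ((List.cons.injEq _ _ _ _).mp hw).1
      exact absurd (this ▸ List.mem_cons_self) hq
    | cons b t' =>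
      rcases h with ⟨w, hw⟩
      simp only [List.cons_append] at hw
      obtain ⟨hab, hw'⟩ := (List.cons.injEq _ _ _ _).mp hw
      have := ih t' x y (fun hm => hq (List.mem_cons_of_mem _ hm))
        (fun hm => ht (List.mem_cons_of_mem _ hm)) ⟨w, hw'⟩
      exact ⟨by rw [hab, this.1], this.2⟩

theorem pvJoin_prefix (c : Char) : ∀ (ps ts : List (List Char)),
    (∀ p ∈ ps, c ∉ p) → (∀ t ∈ ts, c ∉ t) →
    pvJoin c ps <+: pvJoin c ts → ps <+: ts := by
  intro ps
  induction ps with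
  | nil => intro ts _ _ _; exact List.nil_prefix
  | cons q ps' ih =>
    intro ts hps hts h
    cases ts with
    | nil =>
      exfalso
      have := h.length_le
      simp [pvJoin] at this
    | cons t ts' =>
      have h' : (q ++ c :: pvJoin c ps') <+: (t ++ c :: pvJoin c ts') := by
        simpa [pvJoin, List.append_assoc] using h
      obtain ⟨hqt, hp⟩ := pvAlign c q t _ _ (hps q (by simp)) (hts t (by simp)) h'
      have := ih ts' (fun p hp' => hps p (by simp [hp'])) (fun t' ht' => hts t' (by simp [ht'])) hp
      rw [hqt]
      exact List.cons_prefix_cons.mpr ⟨rfl, this⟩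

theorem pvJoin_concat (c : Char) (u : List (List Char)) (hu : u ≠ []) :
    ∃ w, pvJoin c u = w ++ [c] := by
  induction u with
  | nil => exact absurd rfl hu
  | cons x u' ih =>
    cases u' with
    | nil => exact ⟨x, by simp [pvJoin]⟩
    | cons y v =>
      obtain ⟨w, hw⟩ := ih (by simp)
      exact ⟨x ++ [c] ++ w, by simp [pvJoin] at hw ⊢; simp [hw]⟩

-- the core boundary-alignment lemma
theorem pvCore (c : Char) (ps ts : List (List Char))
    (hps : ∀ p ∈ ps, c ∉ p) (hts : ∀ t ∈ ts, c ∉ t) :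
    (c :: pvJoin c ps) <:+: (c :: pvJoin c ts) ↔ ps <:+: ts := by
  constructor
  · intro h
    induction ts generalizing ps with
    | nil =>
      cases ps with
      | nil => simp
      | cons p ps' =>
        exfalso
        have hlen := h.length_le
        simp [pvJoin] at hlen
    | cons t ts' ih =>
      rw [List.infix_cons_iff] at h
      rcases h with h | h
      · rcases h with ⟨w, hw⟩
        have hpre : pvJoin c ps <+: pvJoin c (t :: ts') := by
          refine ⟨w, ?_⟩
          have := ((List.cons.injEq _ _ _ _).mp hw).2
          simpa using this
        exact (pvJoin_prefix c ps (t :: ts') hps hts hpre).isInfix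
      · have h' : (c :: pvJoin c ps) <:+: (c :: pvJoin c ts') := by
          apply pvSkip c _ t _ (hts t (by simp))
          simpa [pvJoin] using h
        exact (ih ps hps (fun t' ht' => hts t' (List.mem_cons_of_mem _ ht')) h').trans
          (List.suffix_cons t ts').isInfix
  · intro h
    rcases h with ⟨u, v, huv⟩
    subst huv
    rcases List.eq_nil_or_concat u with hu | ⟨u', b, hub⟩
    · subst hu
      refine ⟨[], pvJoin c v, ?_⟩
      simp [pvJoin_append]
    · obtain ⟨w, hw⟩ := pvJoin_concat c u (by simp [hub])
      refine ⟨c :: w, pvJoin c v, ?_⟩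
      simp [pvJoin_append, hw]

-- A's four-case test is padded-infix
theorem pvFourA_iff (tl p : List Char) :
    pvFourA tl p = true ↔ ([' '] ++ p ++ [' ']) <:+: ([' '] ++ tl ++ [' ']) := by
  simp only [pvFourA, Bool.or_eq_true, beq_iff_eq, PySem.Chars.startswith_iff,
    PySem.Chars.endswith_iff, PySem.Chars.isIn_iff_infix]
  constructor
  · rintro (((h | h) | h) | h)
    · subst h; exact List.infix_refl _
    · rcases h with ⟨r, hr⟩
      refine ⟨[], r ++ [' '], ?_⟩
      simp [← hr]
    · rcases h with ⟨r, hr⟩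
      refine ⟨' ' :: r, [], ?_⟩
      simp [← hr]
    · exact h.trans ⟨[' '], [' '], rfl⟩
  · rintro ⟨u, v, huv⟩
    cases u with
    | nil =>
      have heq : (p ++ [' '] ++ v) = tl ++ [' '] := by
        have h1 : ' ' :: (p ++ [' '] ++ v) = ' ' :: (tl ++ [' ']) := by
          simpa [List.append_assoc] using huv
        exact ((List.cons.injEq _ _ _ _).mp h1).2
      rcases List.eq_nil_or_concat v with hv | ⟨v', b, hvb⟩
      · subst hv
        left; left; left
        exact (List.append_cancel_right (bs := [' ']) (by simpa using heq)).symm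
      · subst hvb
        have h2 := List.concat_inj.mp
          (show (p ++ [' '] ++ v').concat b = tl.concat ' ' by
            simpa [List.concat_eq_append, List.append_assoc] using heq)
        left; left; right
        exact ⟨v', by simpa [List.append_assoc] using h2.1⟩
    | cons a u' =>
      have h1 := (List.cons.injEq _ _ _ _).mp (by simpa [List.append_assoc] using huv)
      have heq : u' ++ ([' '] ++ p ++ [' ']) ++ v = tl ++ [' '] := by
        simpa [List.append_assoc] using h1.2
      rcases List.eq_nil_or_concat v with hv | ⟨v', b, hvb⟩
      · subst hv
        have h2 := List.concat_inj.mp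
          (show (u' ++ [' '] ++ p).concat ' ' = tl.concat ' ' by
            simpa [List.concat_eq_append, List.append_assoc] using heq)
        left; right
        exact ⟨u', by simpa [List.append_assoc] using h2.1⟩
      · subst hvb
        have h2 := List.concat_inj.mp
          (show (u' ++ ([' '] ++ p ++ [' ']) ++ v').concat b = tl.concat ' ' by
            simpa [List.concat_eq_append, List.append_assoc] using heq)
        right
        exact ⟨u', v', by simpa [List.append_assoc] using h2.1⟩

-- B's slice scan finds exactly the contiguous occurrences
theorem pvOccurs_iff (target words : List (List Char)) :
    pvOccurs target words = true ↔ target <:+: words := by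
  unfold pvOccurs
  rw [List.any_eq_true]
  constructor
  · rintro ⟨i, hmem, hslice⟩
    obtain ⟨hi0, hilt⟩ := PySem.List.mem_pyRange_one.mp hmem
    rw [PySem.List.slice_toNat words hi0 (by omega), beq_iff_eq] at hslice
    have htake : (words.drop i.toNat).take target.length = target := by
      have : (i + (target.length : Int)).toNat - i.toNat = target.length := by omega
      rwa [this] at hslice
    calc target = (words.drop i.toNat).take target.length := htake.symm
      _ <:+: words.drop i.toNat := (List.take_prefix _ _).isInfix
      _ <:+: words := (List.drop_suffix _ _).isInfix
  · rintro ⟨u, v, huv⟩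
    refine ⟨(u.length : Int), ?_, ?_⟩
    · rw [PySem.List.mem_pyRange_one]
      constructor
      · omega
      · have : words.length = u.length + target.length + v.length := by
          simp [← huv]
          omega
        omega
    · rw [PySem.List.slice_toNat words (by omega) (by omega), beq_iff_eq]
      have h2 : ((u.length : Int) + (target.length : Int)).toNat - ((u.length : Int)).toNat
          = target.length := by omega
      have h1 : ((u.length : Int)).toNat = u.length := by omega
      rw [h2, h1, ← huv]
      simp

-- per-phrase agreement of the two tests
theorem pvKey (tl p : List Char) :
    pvFourA tl p = pvOccurs (PySem.Chars.splitOn p [' ']) (PySem.Chars.splitOn tl [' ']) := by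
  rw [pvSplitOn_single, pvSplitOn_single]
  rw [Bool.eq_iff_iff, pvFourA_iff, pvOccurs_iff]
  have hp := pvJoin_split ' ' p
  have ht := pvJoin_split ' ' tl
  have : ([' '] ++ p ++ [' ']) <:+: ([' '] ++ tl ++ [' ']) ↔
      (' ' :: pvJoin ' ' (pvSplit1 ' ' p)) <:+: (' ' :: pvJoin ' ' (pvSplit1 ' ' tl)) := by
    rw [hp, ht]; simp
  rw [this, pvCore ' ' _ _ (pvSplit1_free ' ' p) (pvSplit1_free ' ' tl)]

-- ===== VERDICT (by name: the statement is the Claim_ definition above) =====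
theorem is_greeting_or_pleasantry_py_spec : Claim_equal_is_greeting_or_pleasantry_py := by
  intro text _
  unfold Spec_is_greeting_or_pleasantry_py
  unfold is_greeting_or_pleasantry_py is_greeting_or_pleasantry_py_alt
  simp only [List.any_append]
  rw [PySem.List.any_congr_mem (f := fun g => pvFourA _ g)
        (g := fun phrase => pvOccurs (PySem.Chars.splitOn phrase [' ']) _)
        (fun x _ => pvKey _ x),
      PySem.List.any_congr_mem (l := pvPleasantries) (f := fun g => pvFourA _ g)
        (g := fun phrase => pvOccurs (PySem.Chars.splitOn phrase [' ']) _)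
        (fun x _ => pvKey _ x)]
  cases pvGreetings.any _ <;> cases pvPleasantries.any _ <;> simp
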